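-- pv_equiv track=rewrite | github.com/NatsUIJM/autoContents | mainprogress/pdf_metadata_extractor.py | merge_continuous_ranges
-- ===== SOURCE A (Python) =====
-- def merge_continuous_ranges(page_list: list) -> tuple:
--     """
--     将分散的页码列表合并为最大的连续区间。
--     逻辑：排序后，如果相邻页码差值 <= 1，视为连续。
--     返回最大连续区间的 (start, end)。
--     """
--     if not page_list:
--         return None, None
--
--     sorted_pages = sorted(list(set(page_list)))
--     if len(sorted_pages) == 1:
--         return sorted_pages[0], sorted_pages[0]
--
--     best_start = sorted_pages[0]
--     best_end = sorted_pages[0]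
--     max_len = 1
--
--     current_start = sorted_pages[0]
--     current_end = sorted_pages[0]
--
--     for i in range(1, len(sorted_pages)):
--         prev = sorted_pages[i-1]
--         curr = sorted_pages[i]
--
--         if curr - prev <= 1:
--             current_end = curr
--         else:
--             current_len = current_end - current_start + 1
--             if current_len > max_len:
--                 max_len = current_len
--                 best_start = current_start
--                 best_end = current_end
--             current_start = curr
--             current_end = curr
--
--     current_len = current_end - current_start + 1
--     if current_len > max_len:
--         best_start = current_start
--         best_end = current_end
--
--     return best_start, best_end
-- ===== SOURCE B (Python) =====
-- def merge_continuous_ranges(page_list: list) -> tuple: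
--     # Hash-set "longest consecutive run" algorithm: no sorting. For each value
--     # that begins a run (p-1 absent), walk forward through the set to its end;
--     # keep the run maximizing (length, -start), i.e. longest, earliest on ties.
--     if not page_list:
--         return None, None
--     pages = set(page_list)
--     best = None
--     for p in pages:
--         if p - 1 not in pages:
--             q = p
--             while q + 1 in pages:
--                 q += 1
--             if best is None or (q - p, -p) > (best[1] - best[0], -best[0]):
--                 best = (p, q)
--     return best
-- ===== Notes on version B (the rewrite author's own statement) =====
-- stated objective: alternative
-- what changed: A sorts the deduplicated pages and scans adjacent differences with best/current run bookkeeping; B never sorts: it uses the classic hash-set longest-consecutive-run algorithm, walking forward from each value whose predecessor is absent and keeping the run maximizing (length, -start), which reproduces A's earliest-longest choice.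
import Mathlib
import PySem

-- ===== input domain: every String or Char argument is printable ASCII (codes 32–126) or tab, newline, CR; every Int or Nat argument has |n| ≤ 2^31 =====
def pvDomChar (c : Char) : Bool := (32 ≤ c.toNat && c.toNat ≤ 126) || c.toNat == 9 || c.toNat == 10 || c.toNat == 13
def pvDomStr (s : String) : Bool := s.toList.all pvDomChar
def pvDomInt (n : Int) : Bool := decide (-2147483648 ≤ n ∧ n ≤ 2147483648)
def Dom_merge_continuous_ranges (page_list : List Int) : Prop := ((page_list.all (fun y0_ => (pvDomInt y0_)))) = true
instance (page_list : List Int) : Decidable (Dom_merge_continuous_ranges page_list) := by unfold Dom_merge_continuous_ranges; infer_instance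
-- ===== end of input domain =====

-- B replaces A's sort-then-scan by the sort-free hash-set "longest consecutive run"
-- algorithm: for every value that starts a run, walk forward through the set
-- (objective: alternative; result proved independent of the set's iteration order).

-- ===== PORT A =====
-- the for-loop over i in range(1, len(sorted_pages)) with state
-- (best_start, best_end, max_len, current_start, current_end); prev = sorted_pages[i-1],
-- curr = sorted_pages[i] become the explicitly carried `prev` and the list head.
def mcrLoopA (bs be ml cs ce prev : Int) : List Int → Int × Int
  | [] =>
      if ce - cs + 1 > ml then (cs, ce) else (bs, be)
  | curr :: rest =>
      if curr - prev ≤ 1 then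
        mcrLoopA bs be ml cs curr curr rest
      else
        if ce - cs + 1 > ml then
          mcrLoopA cs ce (ce - cs + 1) curr curr curr rest
        else
          mcrLoopA bs be ml curr curr curr rest

def merge_continuous_ranges (page_list : List Int) : Option Int × Option Int :=
  if page_list = [] then (none, none)
  else
    match PySem.List.sorted (PySem.Set.ofList page_list) (fun x => x) false with
    | [] => (none, none)   -- unreachable: sorted(set(page_list)) of a nonempty list is nonempty
    | [x] => (some x, some x)
    | x :: rest =>
        let p := mcrLoopA x x 1 x x x rest
        (some p.1, some p.2)

-- ===== PORT B =====
-- the tuple comparison (q - p, -p) > (best[1] - best[0], -best[0]) of Source B, spelled out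
-- lexicographically (second components compared as -best[0] < -p ⇔ p < best[0])
def bBetter (b : Int × Int) (p q : Int) : Bool :=
  (b.2 - b.1 < q - p) || (b.2 - b.1 == q - p && p < b.1)

-- the 'while q + 1 in pages: q += 1' walk; fuel |pages| bounds the walk exactly
-- (a run through the distinct members of `pages` has at most |pages| values)
def bWalk (pages : PySem.Set Int) : Nat → Int → Int
  | 0, q => q
  | n + 1, q => if PySem.Set.contains pages (q + 1) then bWalk pages n (q + 1) else q

-- the body of 'for p in pages'
def bStep (pages : PySem.Set Int) (fuel : Nat) (best : Option (Int × Int)) (p : Int) :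
    Option (Int × Int) :=
  if PySem.Set.contains pages (p - 1) then best
  else
    let q := bWalk pages fuel p
    match best with
    | none => some (p, q)
    | some b => if bBetter b p q then some (p, q) else some b

-- 'best = None; for p in pages: ...; return best' on pages = set(page_list)
def bBest (pages : PySem.Set Int) : Option Int × Option Int :=
  match pages.foldl (bStep pages pages.length) none with
  | none => (none, none)   -- unreachable: the least member of a nonempty set starts a run
  | some b => (some b.1, some b.2)

def merge_continuous_ranges_alt (page_list : List Int) : Option Int × Option Int :=
  if page_list = [] then (none, none)
  else bBest (PySem.Set.ofList page_list)

-- ===== PRECONDITION & SPEC =====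
def Spec_merge_continuous_ranges (page_list : List Int) (out : Option Int × Option Int) : Prop := out = merge_continuous_ranges_alt page_list
instance (page_list : List Int) (out : Option Int × Option Int) : Decidable (Spec_merge_continuous_ranges page_list out) := by unfold Spec_merge_continuous_ranges; infer_instance

-- ===== CLAIM (what is proved, stated in full; the proofs are below) =====
def Claim_equal_merge_continuous_ranges : Prop := ∀ (page_list : List Int), Dom_merge_continuous_ranges page_list → Spec_merge_continuous_ranges page_list (merge_continuous_ranges page_list)

-- ===== LEMMAS AND PROOFS =====

-- proof-side view of A: the maximal consecutive segments of the sorted distinct list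
def mcrSegs (s e : Int) : List Int → List (Int × Int)
  | [] => [(s, e)]
  | p :: ps => if p - e ≤ 1 then mcrSegs s p ps else (s, e) :: mcrSegs p p ps

def tailSegs : List Int → List (Int × Int)
  | [] => []
  | y :: r => mcrSegs y y r

-- the first-maximal-by-span step of A's best/current bookkeeping
def mcrStep (b t : Int × Int) : Int × Int :=
  if b.2 - b.1 + 1 < t.2 - t.1 + 1 then t else b

-- B's step once p is known to start a run, as a function of the candidate segment
def gStep (best : Option (Int × Int)) (c : Int × Int) : Option (Int × Int) :=
  match best with
  | none => some c
  | some b => if bBetter b c.1 c.2 then some c else some b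

-- the integer interval [s, e] as a list
def intRange (s e : Int) : List Int :=
  (List.range (e + 1 - s).toNat).map (fun i : Nat => s + (i : Int))

lemma mem_intRange (s e z : Int) : z ∈ intRange s e ↔ s ≤ z ∧ z ≤ e := by
  simp only [intRange, List.mem_map, List.mem_range]
  constructor
  · rintro ⟨i, hi, rfl⟩; omega
  · intro hz; exact ⟨(z - s).toNat, by omega, by omega⟩

lemma length_intRange (s e : Int) : (intRange s e).length = (e + 1 - s).toNat := by
  simp [intRange]

lemma intRange_cons (s e : Int) (h : s ≤ e) : intRange s e = s :: intRange (s + 1) e := by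
  have h1 : (e + 1 - s).toNat = (e + 1 - (s + 1)).toNat + 1 := by omega
  simp only [intRange, h1, List.range_succ_eq_map, List.map_cons, List.map_map]
  congr 1
  · simp
  · apply List.map_congr_left
    intro i _
    simp only [Function.comp_apply, Nat.succ_eq_add_one]
    push_cast
    ring

lemma bBetter_iff (b : Int × Int) (p q : Int) :
    bBetter b p q = true ↔ (b.2 - b.1 < q - p ∨ (b.2 - b.1 = q - p ∧ p < b.1)) := by
  simp [bBetter]

-- A's loop equals "fold the first-maximal-by-span step over the remaining segments", given
-- the invariant max_len = best_end - best_start + 1 and prev = current_end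
lemma mcr_loop_eq_fold (xs : List Int) : ∀ bs be cs ce : Int,
    mcrLoopA bs be (be - bs + 1) cs ce ce xs
      = (mcrSegs cs ce xs).foldl mcrStep (bs, be) := by
  induction xs with
  | nil =>
      intro bs be cs ce
      simp only [mcrLoopA, mcrSegs, List.foldl, mcrStep, gt_iff_lt]
  | cons y ys ih =>
      intro bs be cs ce
      simp only [mcrLoopA, mcrSegs]
      by_cases hgap : y - ce ≤ 1
      · simp only [if_pos hgap]
        exact ih bs be cs y
      · simp only [if_neg hgap, List.foldl]
        by_cases hlen : ce - cs + 1 > be - bs + 1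
        · rw [if_pos hlen, show mcrStep (bs, be) (cs, ce) = (cs, ce) from by
            simp only [mcrStep]; exact if_pos (by omega)]
          exact ih cs ce y y
        · rw [if_neg hlen, show mcrStep (bs, be) (cs, ce) = (bs, be) from by
            simp only [mcrStep]; exact if_neg (by omega)]
          exact ih bs be y y

-- negation form of the lexicographic comparison
lemma bBetter_false_iff (b : Int × Int) (p q : Int) :
    bBetter b p q = false ↔ ¬ (b.2 - b.1 < q - p ∨ (b.2 - b.1 = q - p ∧ p < b.1)) := by
  rw [← bBetter_iff]; simp

-- once a value is known to start a run, B's step is gStep on the candidate segment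
lemma bStep_eq_gStep (S : PySem.Set Int) (fuel : Nat) (b : Option (Int × Int)) (p : Int)
    (h : PySem.Set.contains S (p - 1) = false) :
    bStep S fuel b p = gStep b (p, bWalk S fuel p) := by
  cases b <;> simp only [bStep, gStep, h, Bool.false_eq_true, if_false]

-- gStep commutes on candidates whose key (span, start) is injective
lemma gStep_comm (b : Option (Int × Int)) (c1 c2 : Int × Int)
    (hinj : c1.2 - c1.1 = c2.2 - c2.1 → c1.1 = c2.1 → c1 = c2) :
    gStep (gStep b c1) c2 = gStep (gStep b c2) c1 := by
  obtain ⟨p1, q1⟩ := c1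
  obtain ⟨p2, q2⟩ := c2
  simp only [Prod.mk.injEq] at hinj
  cases b with
  | none =>
      simp only [gStep]
      by_cases h12 : bBetter (p1, q1) p2 q2 = true
      · rw [h12]
        by_cases h21 : bBetter (p2, q2) p1 q1 = true
        · rw [bBetter_iff] at h12 h21
          exfalso; omega
        · rw [Bool.not_eq_true] at h21
          simp only [h21, if_true, Bool.false_eq_true, if_false]
      · rw [Bool.not_eq_true] at h12
        by_cases h21 : bBetter (p2, q2) p1 q1 = true
        · simp only [h12, h21, if_true, Bool.false_eq_true, if_false]
        · rw [Bool.not_eq_true] at h21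
          simp only [h12, h21, Bool.false_eq_true, if_false]
          rw [bBetter_false_iff] at h12 h21
          have h1 : q1 - p1 = q2 - p2 := by omega
          have h2 : p1 = p2 := by omega
          obtain ⟨rfl, rfl⟩ := hinj h1 h2
          rfl
  | some b0 =>
      simp only [gStep]
      by_cases t1 : bBetter b0 p1 q1 = true
      · by_cases t2 : bBetter b0 p2 q2 = true
        · simp only [t1, t2, if_true]
          by_cases h12 : bBetter (p1, q1) p2 q2 = true
          · by_cases h21 : bBetter (p2, q2) p1 q1 = true
            · rw [bBetter_iff] at h12 h21
              exfalso; omega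
            · rw [Bool.not_eq_true] at h21
              simp only [h12, h21, if_true, Bool.false_eq_true, if_false]
          · rw [Bool.not_eq_true] at h12
            by_cases h21 : bBetter (p2, q2) p1 q1 = true
            · simp only [h12, h21, if_true, Bool.false_eq_true, if_false]
            · rw [Bool.not_eq_true] at h21
              simp only [h12, h21, Bool.false_eq_true, if_false]
              rw [bBetter_false_iff] at h12 h21
              have h1 : q1 - p1 = q2 - p2 := by omega
              have h2 : p1 = p2 := by omega
              obtain ⟨rfl, rfl⟩ := hinj h1 h2
              rfl
        · rw [Bool.not_eq_true] at t2
          simp only [t1, t2, if_true, Bool.false_eq_true, if_false]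
          have h12 : bBetter (p1, q1) p2 q2 = false := by
            rw [bBetter_false_iff]
            rw [bBetter_iff] at t1; rw [bBetter_false_iff] at t2
            omega
          simp only [h12, Bool.false_eq_true, if_false]
      · rw [Bool.not_eq_true] at t1
        by_cases t2 : bBetter b0 p2 q2 = true
        · simp only [t1, t2, if_true, Bool.false_eq_true, if_false]
          have h21 : bBetter (p2, q2) p1 q1 = false := by
            rw [bBetter_false_iff]
            rw [bBetter_iff] at t2; rw [bBetter_false_iff] at t1
            omega
          simp only [h21, Bool.false_eq_true, if_false]
        · rw [Bool.not_eq_true] at t2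
          simp only [t1, t2, Bool.false_eq_true, if_false]

-- B's step is right-commutative, so its fold is independent of the set's order
lemma bStep_rcomm (S : PySem.Set Int) (fuel : Nat) (b : Option (Int × Int)) (p1 p2 : Int) :
    bStep S fuel (bStep S fuel b p1) p2 = bStep S fuel (bStep S fuel b p2) p1 := by
  by_cases h1 : PySem.Set.contains S (p1 - 1) = true
  · by_cases h2 : PySem.Set.contains S (p2 - 1) = true
    · simp only [bStep, h1, h2, if_true]
    · rw [Bool.not_eq_true] at h2
      rw [bStep_eq_gStep S fuel b p2 h2, bStep_eq_gStep S fuel _ p2 h2]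
      simp only [bStep, h1, if_true]
  · rw [Bool.not_eq_true] at h1
    by_cases h2 : PySem.Set.contains S (p2 - 1) = true
    · rw [bStep_eq_gStep S fuel b p1 h1, bStep_eq_gStep S fuel _ p1 h1]
      simp only [bStep, h2, if_true]
    · rw [Bool.not_eq_true] at h2
      rw [bStep_eq_gStep S fuel b p1 h1, bStep_eq_gStep S fuel _ p2 h2,
        bStep_eq_gStep S fuel _ p2 h2, bStep_eq_gStep S fuel _ p1 h1]
      exact gStep_comm b _ _ (by intro hd hp; rw [Prod.mk.injEq]; omega)

-- the walk stops exactly at e when [q, e] ⊆ pages and e + 1 ∉ pages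
lemma bWalk_end (S : PySem.Set Int) (e : Int) : ∀ (n : Nat) (q : Int), q ≤ e →
    (e - q).toNat < n →
    (∀ z, q < z → z ≤ e → PySem.Set.contains S z = true) →
    PySem.Set.contains S (e + 1) = false →
    bWalk S n q = e := by
  intro n
  induction n with
  | zero => intro q _ h2 _ _; omega
  | succ m ih =>
      intro q hq hfuel hin hout
      by_cases hqe : q = e
      · subst hqe
        simp only [bWalk, hout, Bool.false_eq_true, if_false]
      · have hq1 : PySem.Set.contains S (q + 1) = true := hin (q + 1) (by omega) (by omega)
        simp only [bWalk, hq1, if_true]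
        exact ih (q + 1) (by omega) (by omega) (fun z h1 h2 => hin z (by omega) h2) hout

-- the first block [x, e]: x starts a run, the walk reaches e, the rest is skipped
lemma block_fold (S : PySem.Set Int) (fuel : Nat) (x e : Int) (acc : Option (Int × Int))
    (hxe : x ≤ e)
    (hlo : PySem.Set.contains S (x - 1) = false)
    (hin : ∀ z, x ≤ z → z ≤ e → PySem.Set.contains S z = true)
    (hhi : PySem.Set.contains S (e + 1) = false)
    (hfuel : (e - x).toNat < fuel) :
    (intRange x e).foldl (bStep S fuel) acc = gStep acc (x, e) := by
  rw [intRange_cons x e hxe, List.foldl_cons]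
  have hstep : bStep S fuel acc x = gStep acc (x, e) := by
    have hw : bWalk S fuel x = e :=
      bWalk_end S e fuel x hxe hfuel (fun z h1 h2 => hin z (by omega) h2) hhi
    rw [bStep_eq_gStep S fuel acc x hlo, hw]
  rw [hstep]
  rw [PySem.List.foldl_congr_mem (intRange (x + 1) e) (bStep S fuel) (fun acc _ => acc) _
    (by
      intro a z hz
      have hz' := (mem_intRange (x + 1) e z).1 hz
      have hz1 : PySem.Set.contains S (z - 1) = true := hin (z - 1) (by omega) (by omega)
      simp only [bStep, hz1, if_true])]
  exact PySem.List.foldl_ignore _ _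

-- decomposition of a strictly increasing list into its first maximal block and the rest
lemma head_block : ∀ (rest : List Int) (s ce : Int), s ≤ ce →
    (ce :: rest).Pairwise (· < ·) →
    ∃ e L', ce ≤ e ∧ ce :: rest = intRange ce e ++ L' ∧ (∀ y ∈ L', e + 2 ≤ y) ∧
      L'.Pairwise (· < ·) ∧ mcrSegs s ce rest = (s, e) :: tailSegs L' := by
  intro rest
  induction rest with
  | nil =>
      intro s ce _ _
      refine ⟨ce, [], le_refl ce, ?_, by simp, List.Pairwise.nil, rfl⟩
      rw [intRange_cons ce ce (le_refl ce)]
      simp [intRange]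
  | cons y ys ih =>
      intro s ce hsce hp
      have hcy : ce < y := (List.pairwise_cons.1 hp).1 y List.mem_cons_self
      have hp' : (y :: ys).Pairwise (· < ·) := (List.pairwise_cons.1 hp).2
      by_cases hgap : y - ce ≤ 1
      · have hy : y = ce + 1 := by omega
        obtain ⟨e, L', h1, h2, h3, h4, h5⟩ := ih s y (by omega) hp'
        refine ⟨e, L', by omega, ?_, h3, h4, ?_⟩
        · rw [intRange_cons ce e (by omega), ← hy, List.cons_append, ← h2]
        · simpa [mcrSegs, hgap] using h5
      · refine ⟨ce, y :: ys, le_refl ce, ?_, ?_, hp', ?_⟩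
        · rw [intRange_cons ce ce (le_refl ce)]
          simp [intRange]
        · intro z hz
          rcases List.mem_cons.1 hz with rfl | hz'
          · omega
          · have := List.pairwise_cons.1 hp'
            have := this.1 z hz'
            omega
        · simp [mcrSegs, hgap, tailSegs]

-- B's fold over the strictly increasing member list equals gStep folded over A's segments
lemma main_fold (S : PySem.Set Int) (fuel : Nat) :
    ∀ (n : Nat) (L : List Int) (x : Int) (rest : List Int) (acc : Option (Int × Int)),
    L = x :: rest → L.length ≤ n → L.Pairwise (· < ·) →
    (∀ z : Int, x - 1 ≤ z → (PySem.Set.contains S z = true ↔ z ∈ L)) →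
    L.length ≤ fuel →
    L.foldl (bStep S fuel) acc = (mcrSegs x x rest).foldl gStep acc := by
  intro n
  induction n with
  | zero => intro L x rest acc hL hn _ _ _; subst hL; simp at hn
  | succ m ih =>
      intro L x rest acc hL hn hpw hmem hfuel
      subst hL
      obtain ⟨e, L', hxe, hdec, hgap, hpw', hsegs⟩ := head_block rest x x (le_refl x) hpw
      have hlen : (intRange x e).length = (e + 1 - x).toNat := length_intRange x e
      have hlenL : (x :: rest).length = (e + 1 - x).toNat + L'.length := by
        rw [hdec, List.length_append, hlen]
      -- membership facts for the first block
      have hlo : PySem.Set.contains S (x - 1) = false := by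
        by_contra h
        have h' : PySem.Set.contains S (x - 1) = true := by
          cases hc : PySem.Set.contains S (x - 1) with
          | false => exact absurd hc h
          | true => rfl
        have := (hmem (x - 1) (by omega)).1 h'
        rw [hdec] at this
        rcases List.mem_append.1 this with h1 | h2
        · have := (mem_intRange x e (x - 1)).1 h1; omega
        · have := hgap _ h2; omega
      have hin : ∀ z, x ≤ z → z ≤ e → PySem.Set.contains S z = true := by
        intro z h1 h2
        refine (hmem z (by omega)).2 ?_
        rw [hdec]
        exact List.mem_append.2 (Or.inl ((mem_intRange x e z).2 ⟨h1, h2⟩))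
      have hhi : PySem.Set.contains S (e + 1) = false := by
        by_contra h
        have h' : PySem.Set.contains S (e + 1) = true := by
          cases hc : PySem.Set.contains S (e + 1) with
          | false => exact absurd hc h
          | true => rfl
        have := (hmem (e + 1) (by omega)).1 h'
        rw [hdec] at this
        rcases List.mem_append.1 this with h1 | h2
        · have := (mem_intRange x e (e + 1)).1 h1; omega
        · have := hgap _ h2; omega
      have hfuel' : (e - x).toNat < fuel := by omega
      have hblock := block_fold S fuel x e acc hxe hlo hin hhi hfuel'
      rw [hdec, List.foldl_append, hblock, hsegs, List.foldl_cons]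
      -- recurse on L'
      cases hL' : L' with
      | nil => simp [tailSegs]
      | cons y r' =>
          subst hL'
          have hy : e + 2 ≤ y := hgap y List.mem_cons_self
          have hmem' : ∀ z : Int, y - 1 ≤ z → (PySem.Set.contains S z = true ↔ z ∈ y :: r') := by
            intro z hz
            rw [hmem z (by omega), hdec, List.mem_append]
            constructor
            · rintro (h1 | h2)
              · have := (mem_intRange x e z).1 h1; omega
              · exact h2
            · exact Or.inr
          exact ih (y :: r') y r' (gStep acc (x, e)) rfl (by omega)
            hpw' hmem' (by omega)

-- gStep agrees with A's first-maximal-by-span step once starts strictly increase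
lemma gfold_eq_mcrStep_fold : ∀ (ss : List (Int × Int)) (b : Int × Int),
    (∀ c ∈ ss, b.1 < c.1) → (ss.map Prod.fst).Pairwise (· < ·) →
    ss.foldl gStep (some b) = some (ss.foldl mcrStep b) := by
  intro ss
  induction ss with
  | nil => intro b _ _; rfl
  | cons c t ih =>
      intro b hb hpw
      have hbc : b.1 < c.1 := hb c List.mem_cons_self
      have hstep : gStep (some b) c = some (mcrStep b c) := by
        simp only [gStep, mcrStep, bBetter]
        split_ifs with h1 h2 h2 <;>
          simp_all only [Bool.or_eq_true, Bool.and_eq_true, decide_eq_true_eq, beq_iff_eq,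
            not_or, not_and, not_lt] <;> omega
      rw [List.foldl_cons, List.foldl_cons, hstep]
      have hct : ∀ d ∈ t, c.1 < d.1 := by
        intro d hd
        have := (List.pairwise_cons.1 (by simpa using hpw)).1 d.1 (List.mem_map_of_mem hd)
        exact this
      refine ih (mcrStep b c) ?_ ?_
      · intro d hd
        have h1 := hct d hd
        simp only [mcrStep]
        split_ifs <;> omega
      · exact (List.pairwise_cons.1 (by simpa using hpw)).2

-- segment starts are strictly increasing and bounded below by s
lemma segs_fst : ∀ (rest : List Int) (s ce : Int), s ≤ ce → (ce :: rest).Pairwise (· < ·) →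
    ((mcrSegs s ce rest).map Prod.fst).Pairwise (· < ·) ∧
      (∀ c ∈ mcrSegs s ce rest, s ≤ c.1) := by
  intro rest
  induction rest with
  | nil => intro s ce _ _; simp [mcrSegs]
  | cons y ys ih =>
      intro s ce hsce hp
      have hcy : ce < y := (List.pairwise_cons.1 hp).1 y List.mem_cons_self
      have hp' : (y :: ys).Pairwise (· < ·) := (List.pairwise_cons.1 hp).2
      by_cases hgap : y - ce ≤ 1
      · simpa [mcrSegs, hgap] using ih s y (by omega) hp'
      · obtain ⟨h1, h2⟩ := ih y y (le_refl y) hp'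
        refine ⟨?_, ?_⟩
        · simp only [mcrSegs, hgap, if_neg, not_false_eq_true, List.map_cons]
          refine List.pairwise_cons.2 ⟨?_, by simpa [hgap] using h1⟩
          intro a ha
          obtain ⟨c, hc, rfl⟩ := List.mem_map.1 ha
          have := h2 c hc
          omega
        · intro c hc
          simp only [mcrSegs, hgap, if_neg, not_false_eq_true] at hc
          rcases List.mem_cons.1 hc with rfl | hc'
          · exact le_refl s
          · have := h2 c hc'; omega

-- the head segment starts at the list head with an end at least as large
lemma segs_head (rest : List Int) (x : Int) (hpw : (x :: rest).Pairwise (· < ·)) :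
    ∃ e ss, mcrSegs x x rest = (x, e) :: ss ∧ x ≤ e := by
  obtain ⟨e, L', hxe, _, _, _, hsegs⟩ := head_block rest x x (le_refl x) hpw
  exact ⟨e, tailSegs L', hsegs, hxe⟩

-- ===== VERDICT (by name: the statement is the Claim_ definition above) =====
theorem merge_continuous_ranges_spec : Claim_equal_merge_continuous_ranges := by
  intro page_list _
  show merge_continuous_ranges page_list = merge_continuous_ranges_alt page_list
  by_cases hnil : page_list = []
  · subst hnil; rfl
  · set S : PySem.Set Int := PySem.Set.ofList page_list with hS
    set L : List Int := PySem.List.sorted S (fun x => x) false with hLdef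
    have hperm : L.Perm S := PySem.List.sorted_perm S (fun x => x) false
    have hLne : L ≠ [] := by
      intro h
      rw [hLdef, PySem.List.sorted_eq_nil_iff] at h
      exact hnil (List.eq_nil_of_subset_nil (fun a ha => h ▸ (PySem.Set.mem_ofList _ _).2 ha))
    have hpw : L.Pairwise (· < ·) := PySem.List.sorted_ofList_pairwise_lt page_list
    have hmemL : ∀ z : Int, PySem.Set.contains S z = true ↔ z ∈ L := by
      intro z
      rw [PySem.Set.contains_iff]
      exact ⟨fun h => hperm.mem_iff.2 h, fun h => hperm.mem_iff.1 h⟩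
    have hfold : S.foldl (bStep S S.length) none = L.foldl (bStep S S.length) none :=
      (hperm.foldl_eq' (fun p1 _ p2 _ b => bStep_rcomm S S.length b p1 p2) none).symm
    rcases hLcase : L with _ | ⟨x, rest⟩
    · exact absurd hLcase hLne
    · have hlenLS : L.length = S.length := hperm.length_eq
      have hmain := main_fold S S.length L.length L x rest none hLcase
        (le_refl _) (hLcase ▸ hpw) (fun z _ => (hmemL z).trans (by rw [hLcase]))
        (le_of_eq hlenLS)
      rw [hLcase] at hmain
      obtain ⟨e, ss, hsegs, hxe⟩ := segs_head rest x (hLcase ▸ hpw)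
      have hstarts := segs_fst rest x x (le_refl x) (hLcase ▸ hpw)
      rw [hsegs] at hstarts
      have hgf : (mcrSegs x x rest).foldl gStep none = some (ss.foldl mcrStep (x, e)) := by
        rw [hsegs, List.foldl_cons]
        show ss.foldl gStep (some (x, e)) = _
        refine gfold_eq_mcrStep_fold ss (x, e) ?_ ?_
        · intro c hc
          exact (List.pairwise_cons.1 (by simpa using hstarts.1)).1 c.1 (List.mem_map_of_mem hc)
        · exact (List.pairwise_cons.1 (by simpa using hstarts.1)).2
      have hBval : merge_continuous_ranges_alt page_list
          = (some (ss.foldl mcrStep (x, e)).1, some (ss.foldl mcrStep (x, e)).2) := by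
        unfold merge_continuous_ranges_alt bBest
        rw [if_neg hnil, ← hS, hfold, hLcase, hmain, hgf]
      have hAval : merge_continuous_ranges page_list
          = match x :: rest with
            | [] => ((none : Option Int), (none : Option Int))
            | [x] => (some x, some x)
            | x :: rest => (some (mcrLoopA x x 1 x x x rest).1, some (mcrLoopA x x 1 x x x rest).2) := by
        unfold merge_continuous_ranges
        rw [if_neg hnil, ← hS, ← hLdef, hLcase]
      rw [hAval, hBval]
      rcases rest with _ | ⟨y, ys⟩
      · -- single element: the only segment is (x, x)
        have hsx : mcrSegs x x ([] : List Int) = [(x, x)] := rfl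
        rw [hsx] at hsegs
        injection hsegs with h1 h2
        injection h1.symm with h3 h4
        subst h4
        rw [← h2]
        rfl
      · -- two or more elements: A's loop via mcr_loop_eq_fold
        have hA := mcr_loop_eq_fold (y :: ys) x x x x
        rw [show x - x + 1 = (1 : Int) from by ring] at hA
        have hstep0 : mcrStep (x, x) (x, e) = (x, e) := by
          simp only [mcrStep]
          split_ifs with h
          · rfl
          · have he : e = x := by omega
            rw [he]
        show (some (mcrLoopA x x 1 x x x (y :: ys)).1, some (mcrLoopA x x 1 x x x (y :: ys)).2) = _
        rw [hA, hsegs, List.foldl_cons, hstep0]
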